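-- pv_equiv track=rewrite | github.com/StructDiffusion/StructDiffusion | src/StructDiffusion/utils/rearrangement.py | get_initial_scene_idxs_raw_data
-- ===== SOURCE A (Python) =====
-- def get_initial_scene_idxs_raw_data(data):
--     """
--     This function finds initial scenes from the dataset
--     :param dataset:
--     :return:
--     """
--
--     initial_scene2idx_t = {}
--     for idx in range(len(data)):
--         filename, t = data[idx]
--         if filename not in initial_scene2idx_t:
--             initial_scene2idx_t[filename] = (idx, t)
--         else:
--             if t > initial_scene2idx_t[filename][1]:
--                 initial_scene2idx_t[filename] = (idx, t)
--     initial_scene_idxs = [initial_scene2idx_t[f][0] for f in initial_scene2idx_t]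
--     return initial_scene_idxs
-- ===== SOURCE B (Python) =====
-- def get_initial_scene_idxs_raw_data(data):
--     """
--     This function finds initial scenes from the dataset
--     :param dataset:
--     :return:
--     """
--     # Two staged passes, no dict: collect the distinct filenames in first-occurrence
--     # order, then for each filename scan the whole data for the first argmax-t index
--     # (strict '>' keeps the earliest index on ties, as in the original).
--     seen = []
--     for filename, _t in data:
--         if filename not in seen:
--             seen.append(filename)
--     result = []
--     for f in seen:
--         best = None
--         for i, (name, t) in enumerate(data):
--             if name == f and (best is None or t > best[1]):
--                 best = (i, t)
--         result.append(best[0])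
--     return result
-- ===== Notes on version B (the rewrite author's own statement) =====
-- stated objective: alternative
-- what changed: Replaces A's single-pass running-argmax dictionary with a dict-free two-stage decomposition: first collect the distinct filenames in first-occurrence order, then for each filename re-scan the whole list for its first max-t index (O(n*k) nested scans instead of A's O(n) hashed pass).
import Mathlib
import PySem

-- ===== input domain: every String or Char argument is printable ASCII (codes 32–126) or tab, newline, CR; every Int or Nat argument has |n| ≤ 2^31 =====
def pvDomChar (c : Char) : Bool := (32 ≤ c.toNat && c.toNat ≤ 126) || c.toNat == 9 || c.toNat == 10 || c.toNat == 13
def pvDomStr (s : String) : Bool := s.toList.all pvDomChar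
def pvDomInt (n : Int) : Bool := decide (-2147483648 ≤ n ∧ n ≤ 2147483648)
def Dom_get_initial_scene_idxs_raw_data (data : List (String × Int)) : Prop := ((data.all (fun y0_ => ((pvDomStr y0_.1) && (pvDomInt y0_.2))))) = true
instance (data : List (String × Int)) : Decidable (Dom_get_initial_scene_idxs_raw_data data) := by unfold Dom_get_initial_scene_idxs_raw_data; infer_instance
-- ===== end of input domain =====

-- B replaces A's single-pass running-argmax dictionary with a dict-free
-- two-stage decomposition: collect the distinct filenames in first-occurrence
-- order, then for each filename re-scan the data for its first max-t index;
-- alternative structure (nested scans), not faster.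


-- ===== PORT A =====
-- A's loop body: 'if filename not in dict' inserts (idx, t), else the strict
-- '>' comparison against the stored t decides whether to overwrite.
-- (the getD default (0, 0) is only read in the branch where the key is present)
def pvStepA (d : PySem.Dict String (Int × Int)) (p : Int × (String × Int)) :
    PySem.Dict String (Int × Int) :=
  if d.contains p.2.1 = false then d.insert p.2.1 (p.1, p.2.2)
  else if p.2.2 > (d.getD p.2.1 (0, 0)).2 then d.insert p.2.1 (p.1, p.2.2)
  else d

-- the dict A builds over 'for idx in range(len(data)): filename, t = data[idx]'
def pvDictA (data : List (String × Int)) : PySem.Dict String (Int × Int) :=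
  (PySem.List.enumerate data).foldl pvStepA PySem.Dict.empty

-- final comprehension: [d[f][0] for f in d]
def get_initial_scene_idxs_raw_data (data : List (String × Int)) : List Int :=
  (pvDictA data).keys.map (fun f => ((pvDictA data).getD f (0, 0)).1)

-- ===== PORT B =====
-- first pass: 'for filename, _t in data: if filename not in seen: seen.append(filename)'
def pvSeen (data : List (String × Int)) : PySem.Set String :=
  data.foldl (fun s p => PySem.Set.add s p.1) PySem.Set.empty

-- inner scan for one filename f:
-- 'if name == f and (best is None or t > best[1]): best = (i, t)'
def pvBestStep (f : String) (best : Option (Int × Int)) (p : Int × (String × Int)) :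
    Option (Int × Int) :=
  if p.2.1 = f then
    match best with
    | none => some (p.1, p.2.2)
    | some b => if p.2.2 > b.2 then some (p.1, p.2.2) else some b
  else best

-- 'for i, (name, t) in enumerate(data): …'
def pvBest (data : List (String × Int)) (f : String) : Option (Int × Int) :=
  (PySem.List.enumerate data).foldl (pvBestStep f) none

-- 'result.append(best[0])' — every f in seen occurs in data, so best is some;
-- the getD default (0, 0) is never read.
def get_initial_scene_idxs_raw_data_alt (data : List (String × Int)) : List Int :=
  (pvSeen data).map (fun f => ((pvBest data f).getD (0, 0)).1)

-- ===== PRECONDITION & SPEC =====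
def Spec_get_initial_scene_idxs_raw_data (data : List (String × Int)) (out : List Int) : Prop := out = get_initial_scene_idxs_raw_data_alt data
instance (data : List (String × Int)) (out : List Int) : Decidable (Spec_get_initial_scene_idxs_raw_data data out) := by unfold Spec_get_initial_scene_idxs_raw_data; infer_instance

-- ===== CLAIM (what is proved, stated in full; the proofs are below) =====
def Claim_equal_get_initial_scene_idxs_raw_data : Prop := ∀ (data : List (String × Int)), Dom_get_initial_scene_idxs_raw_data data → Spec_get_initial_scene_idxs_raw_data data (get_initial_scene_idxs_raw_data data)

-- ===== LEMMAS AND PROOFS =====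

-- the invariant: after any prefix ps of (index, (filename, t)) pairs, A's dict
-- has as keys exactly the distinct filenames of ps in first-occurrence order,
-- and stores per filename exactly what B's per-filename scan of ps computes.
lemma pvBestStep_ne (f : String) (acc : Option (Int × Int))
    (p : Int × (String × Int)) (h : ¬ p.2.1 = f) : pvBestStep f acc p = acc := by
  simp [pvBestStep, h]

lemma pv_inv (ps : List (Int × (String × Int))) :
    (ps.foldl pvStepA PySem.Dict.empty).keys =
      PySem.Set.ofList (ps.map (fun p => p.2.1)) ∧
    ∀ f, (ps.foldl pvStepA PySem.Dict.empty).get? f = ps.foldl (pvBestStep f) none := by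
  induction ps using List.reverseRecOn with
  | nil => exact ⟨rfl, fun f => by simp [PySem.Dict.get?_empty]⟩
  | append_singleton ps x ih =>
      obtain ⟨hkeys, hget⟩ := ih
      simp only [List.foldl_append, List.foldl_cons, List.foldl_nil, List.map_append,
        List.map_cons, List.map_nil]
      rw [PySem.Set.ofList_append_singleton]
      set dA := ps.foldl pvStepA PySem.Dict.empty with hdA
      obtain ⟨i, fn, t⟩ := x
      have hmemkeys : dA.contains fn = true ↔ fn ∈ dA.keys :=
        PySem.Dict.contains_iff_mem_keys dA fn
      cases hg : dA.get? fn with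
      | none =>
          have hc : dA.contains fn = false := by
            rw [PySem.Dict.contains_eq_isSome_get?, hg]; rfl
          have hstep : pvStepA dA (i, fn, t) = dA.insert fn (i, t) := by
            simp [pvStepA, hc]
          have hnotmem : fn ∉ PySem.Set.ofList (ps.map (fun p => p.2.1)) := by
            rw [← hkeys]
            intro hmem
            rw [hmemkeys.mpr hmem] at hc
            exact absurd hc (by simp)
          constructor
          · rw [hstep, PySem.Dict.keys_insert_of_not_contains _ _ hc, hkeys,
                PySem.Set.add_of_not_mem hnotmem]
          · intro f
            rw [hstep]
            by_cases hf : f = fn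
            · subst hf
              rw [PySem.Dict.get?_insert_self]
              simp [pvBestStep, ← hget f, hg]
            · rw [PySem.Dict.get?_insert_of_ne _ _ hf,
                  pvBestStep_ne f _ _ (fun h => hf h.symm), hget f]
      | some b =>
          have hc : dA.contains fn = true := by
            rw [PySem.Dict.contains_eq_isSome_get?, hg]; rfl
          have hmem : fn ∈ PySem.Set.ofList (ps.map (fun p => p.2.1)) := by
            rw [← hkeys]; exact hmemkeys.mp hc
          have hgD : dA.getD fn (0, 0) = b := by
            rw [PySem.Dict.getD_eq_get?_getD, hg]; rfl
          have hkeys' := PySem.Set.add_of_mem hmem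
          by_cases ht : t > b.2
          · have hstep : pvStepA dA (i, fn, t) = dA.insert fn (i, t) := by
              simp [pvStepA, hc, hgD, ht]
            constructor
            · rw [hstep, PySem.Dict.keys_insert_of_contains _ _ hc, hkeys, hkeys']
            · intro f
              rw [hstep]
              by_cases hf : f = fn
              · subst hf
                rw [PySem.Dict.get?_insert_self]
                simp [pvBestStep, ← hget f, hg, ht]
              · rw [PySem.Dict.get?_insert_of_ne _ _ hf,
                    pvBestStep_ne f _ _ (fun h => hf h.symm), hget f]
          · have hstep : pvStepA dA (i, fn, t) = dA := by
              simp [pvStepA, hc, hgD, ht]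
            constructor
            · rw [hstep, hkeys, hkeys']
            · intro f
              rw [hstep]
              by_cases hf : f = fn
              · subst hf
                simp [pvBestStep, ← hget f, hg, ht]
              · rw [pvBestStep_ne f _ _ (fun h => hf h.symm), hget f]

lemma pv_seen_eq (data : List (String × Int)) :
    pvSeen data = PySem.Set.ofList (data.map Prod.fst) := by
  unfold pvSeen
  rw [← PySem.Set.update_map_eq_foldl_add, PySem.Set.update_empty]

theorem pv_main (data : List (String × Int)) :
    get_initial_scene_idxs_raw_data data = get_initial_scene_idxs_raw_data_alt data := by
  unfold get_initial_scene_idxs_raw_data get_initial_scene_idxs_raw_data_alt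
  obtain ⟨hkeys, hget⟩ := pv_inv (PySem.List.enumerate data)
  have hsnd : (PySem.List.enumerate data).map (fun p => p.2.1) = data.map Prod.fst := by
    have h := PySem.List.map_snd_enumerate data (0 : Int)
    calc (PySem.List.enumerate data).map (fun p => p.2.1)
        = ((PySem.List.enumerate data).map (fun p => p.2)).map Prod.fst := by
          rw [List.map_map]; rfl
      _ = data.map Prod.fst := by rw [h]
  have hkeys' : (pvDictA data).keys = pvSeen data := by
    rw [pv_seen_eq, ← hsnd]; exact hkeys
  rw [← hkeys']
  apply List.map_congr_left
  intro f _
  rw [PySem.Dict.getD_eq_get?_getD]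
  have : (pvDictA data).get? f = pvBest data f := hget f
  rw [this]

-- ===== VERDICT (by name: the statement is the Claim_ definition above) =====
theorem get_initial_scene_idxs_raw_data_spec : Claim_equal_get_initial_scene_idxs_raw_data := by
  intro data _
  unfold Spec_get_initial_scene_idxs_raw_data
  exact pv_main data
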